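-- pv_equiv track=rewrite | github.com/Rissk9/EkalavyaAI | backend/advancedats.py | _assess_job_progression
-- ===== SOURCE A (Python) =====
-- from typing import Dict, List, Tuple, Optional
--
-- def _assess_job_progression(jobs: List[Dict]) -> str:
--     """Assess if career progression is ascending, flat, or mixed"""
--     if len(jobs) < 2:
--         return "flat"
--
--     # Simple heuristic: check if titles/companies indicate progression
--     # (This could be enhanced with NLP)
--     seniority_keywords = {
--         "senior": 3,
--         "lead": 3,
--         "principal": 3,
--         "mid": 2,
--         "junior": 1,
--         "intern": 0
--     }
--
--     scores = []
--     for job in jobs: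
--         desc = job.get("description", "").lower()
--         score = max(
--             [seniority_keywords.get(kw, 1) for kw in seniority_keywords
--              if kw in desc]
--         ) if any(kw in desc for kw in seniority_keywords) else 1
--         scores.append(score)
--
--     if len(scores) >= 2:
--         if scores[-1] > scores[0]:
--             return "ascending"
--         elif scores[-1] == scores[0]:
--             return "flat"
--         else:
--             return "mixed"
--
--     return "flat"
-- ===== SOURCE B (Python) =====
-- def _score_desc(desc):
--     # Highest matching seniority wins; since senior/lead/principal all map to 3,
--     # mid to 2, junior to 1, intern to 0 (default 1), the max over matching
--     # keywords collapses to this priority chain.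
--     if "senior" in desc or "lead" in desc or "principal" in desc:
--         return 3
--     if "mid" in desc:
--         return 2
--     if "junior" in desc:
--         return 1
--     if "intern" in desc:
--         return 0
--     return 1
--
-- def _assess_job_progression(jobs):
--     if len(jobs) < 2:
--         return "flat"
--     first = _score_desc(jobs[0].get("description", "").lower())
--     last = _score_desc(jobs[-1].get("description", "").lower())
--     if last > first:
--         return "ascending"
--     if last == first:
--         return "flat"
--     return "mixed"
-- ===== Notes on version B (the rewrite author's own statement) =====
-- stated objective: simpler
-- what changed: B replaces the dict-of-scores plus max-over-matching-keywords comprehension (computed for every job and stored in a list) by a fixed priority if-chain over the keywords, evaluated only at the first and last job.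
import Mathlib
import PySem

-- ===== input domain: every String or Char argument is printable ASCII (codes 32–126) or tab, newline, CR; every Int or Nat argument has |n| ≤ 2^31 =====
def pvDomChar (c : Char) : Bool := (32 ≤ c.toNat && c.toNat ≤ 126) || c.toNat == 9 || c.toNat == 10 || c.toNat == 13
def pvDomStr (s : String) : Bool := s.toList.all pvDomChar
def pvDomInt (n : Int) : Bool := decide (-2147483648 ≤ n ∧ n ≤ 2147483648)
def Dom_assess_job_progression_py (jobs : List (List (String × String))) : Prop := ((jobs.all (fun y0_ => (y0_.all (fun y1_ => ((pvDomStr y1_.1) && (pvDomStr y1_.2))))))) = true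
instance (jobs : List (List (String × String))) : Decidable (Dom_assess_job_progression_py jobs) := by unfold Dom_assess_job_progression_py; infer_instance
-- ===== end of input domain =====

-- B replaces A's dict + max-over-matching-keywords comprehension (run for every job into a
-- scores list) by a fixed priority if-chain, evaluated only at the first and last job
-- (objective: simpler).

-- ===== PORT A =====
-- the seniority_keywords dict literal
def pvKw : List (String × Int) :=
  [("senior", 3), ("lead", 3), ("principal", 3), ("mid", 2), ("junior", 1), ("intern", 0)]

-- body of A's `for job in jobs` loop: desc and score for one job
def pvScoreA (job : List (String × String)) : Int :=
  let desc := PySem.Str.lower ((PySem.Dict.mk job).getD "description" "")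
  if pvKw.any (fun kv => PySem.Str.isIn kv.1 desc) then
    (PySem.List.max?
      (pvKw.filterMap (fun kv =>
        if PySem.Str.isIn kv.1 desc then some ((PySem.Dict.mk pvKw).getD kv.1 1) else none))
      (fun y => y)).getD 1   -- max of a nonempty list under the `any` guard
  else 1

def assess_job_progression_py (jobs : List (List (String × String))) : String :=
  if jobs.length < 2 then "flat"
  else
    let scores := jobs.foldl (fun acc job => acc ++ [pvScoreA job]) []
    if scores.length ≥ 2 then
      if PySem.List.pyGetD scores (-1) 1 > PySem.List.pyGetD scores 0 1 then "ascending"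
      else if PySem.List.pyGetD scores (-1) 1 == PySem.List.pyGetD scores 0 1 then "flat"
      else "mixed"
    else "flat"

-- ===== PORT B =====
-- B's _score_desc: priority chain, highest seniority first (default 1)
def pvScoreDesc (desc : String) : Int :=
  if PySem.Str.isIn "senior" desc || PySem.Str.isIn "lead" desc || PySem.Str.isIn "principal" desc then 3
  else if PySem.Str.isIn "mid" desc then 2
  else if PySem.Str.isIn "junior" desc then 1
  else if PySem.Str.isIn "intern" desc then 0
  else 1

def assess_job_progression_py_alt (jobs : List (List (String × String))) : String :=
  match jobs with
  | [] => "flat"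
  | [_] => "flat"
  | j :: rest =>
    let first := pvScoreDesc (PySem.Str.lower ((PySem.Dict.mk j).getD "description" ""))
    let last := pvScoreDesc (PySem.Str.lower
      ((PySem.Dict.mk ((j :: rest).getLast (List.cons_ne_nil _ _))).getD "description" ""))
    if last > first then "ascending"
    else if last == first then "flat"
    else "mixed"

-- ===== PRECONDITION & SPEC =====
def Spec_assess_job_progression_py (jobs : List (List (String × String))) (out : String) : Prop := out = assess_job_progression_py_alt jobs
instance (jobs : List (List (String × String))) (out : String) : Decidable (Spec_assess_job_progression_py jobs out) := by unfold Spec_assess_job_progression_py; infer_instance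

-- ===== CLAIM (what is proved, stated in full; the proofs are below) =====
def Claim_equal_assess_job_progression_py : Prop := ∀ (jobs : List (List (String × String))), Dom_assess_job_progression_py jobs → Spec_assess_job_progression_py jobs (assess_job_progression_py jobs)

-- ===== LEMMAS AND PROOFS =====

-- A's max over matching keyword values is B's priority chain: values are 3,3,3,2,1,0 in
-- decreasing order, so the max is decided by the first matching tier (default 1 when none match).
theorem chain_eq (desc : String) :
    (if pvKw.any (fun kv => PySem.Str.isIn kv.1 desc) then
      (PySem.List.max?
        (pvKw.filterMap (fun kv =>
          if PySem.Str.isIn kv.1 desc then some ((PySem.Dict.mk pvKw).getD kv.1 1) else none))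
        (fun y => y)).getD 1
    else 1) = pvScoreDesc desc := by
  unfold pvScoreDesc pvKw
  by_cases h1 : PySem.Str.isIn "senior" desc <;>
  by_cases h2 : PySem.Str.isIn "lead" desc <;>
  by_cases h3 : PySem.Str.isIn "principal" desc <;>
  by_cases h4 : PySem.Str.isIn "mid" desc <;>
  by_cases h5 : PySem.Str.isIn "junior" desc <;>
  by_cases h6 : PySem.Str.isIn "intern" desc <;>
  simp only [List.any_cons, List.any_nil, List.filterMap_cons, List.filterMap_nil,
    h1, h2, h3, h4, h5, h6, if_true, Bool.or_false, Bool.or_true, Bool.or_self] <;>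
  simp [PySem.List.max?, PySem.Dict.getD, PySem.Dict.get?]

theorem pvScoreA_eq_chain (job : List (String × String)) :
    pvScoreA job
      = pvScoreDesc (PySem.Str.lower ((PySem.Dict.mk job).getD "description" "")) := by
  unfold pvScoreA
  exact chain_eq _

-- ===== VERDICT (by name: the statement is the Claim_ definition above) =====
theorem assess_job_progression_py_spec : Claim_equal_assess_job_progression_py := by
  intro jobs _
  unfold Spec_assess_job_progression_py
  match jobs with
  | [] => rfl
  | [_] => rfl
  | j :: k :: rest =>
    unfold assess_job_progression_py assess_job_progression_py_alt
    have hlen : ¬ (j :: k :: rest).length < 2 := by simp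
    have hmap : (j :: k :: rest).foldl (fun acc job => acc ++ [pvScoreA job]) []
        = (j :: k :: rest).map pvScoreA := by
      rw [PySem.List.foldl_append_singleton_eq_map]; simp
    have hmne : ((j :: k :: rest).map pvScoreA) ≠ [] := by simp
    simp only [hlen, if_false, hmap]
    rw [PySem.List.pyGetD_neg_one _ _ hmne]
    have hlast : ((j :: k :: rest).map pvScoreA).getLast hmne
        = pvScoreA ((j :: k :: rest).getLast (List.cons_ne_nil _ _)) := by
      rw [List.getLast_map]
    rw [hlast, pvScoreA_eq_chain]
    simp [PySem.List.pyGetD_zero, pvScoreA_eq_chain]
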